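-- pv_equiv track=rewrite | github.com/hllee0519/STAT5106_ASM2 | asm2q2part2.py | inputChecking
-- ===== SOURCE A (Python) =====
-- def inputChecking(entry):
-- 	if(len(entry)<6):
-- 		return False
-- 	for i in range(len(entry)):
-- 		element = entry[i]
-- 		try:
-- 			if(element>49 or element<0 or entry.index(element)!=i):
-- 				return False
-- 		except:
-- 			continue
-- 	return True
-- ===== SOURCE B (Python) =====
-- def inputChecking(entry):
--     if len(entry) < 6:
--         return False
--     s = sorted(entry)
--     if s[0] < 0 or s[-1] > 49:
--         return False
--     for k in range(len(s) - 1):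
--         if s[k] == s[k + 1]:
--             return False
--     return True
-- ===== Notes on version B (the rewrite author's own statement) =====
-- stated objective: alternative
-- what changed: Sort-then-scan: B sorts the entry once, range-checks only the sorted minimum and maximum, and detects duplicates by comparing adjacent sorted elements, instead of A's per-element range test with a repeated entry.index scan.
import Mathlib
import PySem

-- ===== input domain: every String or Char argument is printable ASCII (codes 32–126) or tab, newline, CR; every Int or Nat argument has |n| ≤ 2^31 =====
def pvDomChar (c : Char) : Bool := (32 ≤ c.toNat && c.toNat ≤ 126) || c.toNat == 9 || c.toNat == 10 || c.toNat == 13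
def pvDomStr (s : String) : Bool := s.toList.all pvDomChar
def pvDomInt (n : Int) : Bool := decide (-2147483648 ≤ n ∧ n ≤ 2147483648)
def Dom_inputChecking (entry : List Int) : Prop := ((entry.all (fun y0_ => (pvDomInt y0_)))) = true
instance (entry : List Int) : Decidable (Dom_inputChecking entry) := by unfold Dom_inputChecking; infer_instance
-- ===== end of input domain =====

-- B sorts the entry once, range-checks only the sorted minimum and maximum, and finds
-- duplicates by comparing adjacent sorted elements, instead of A's per-element range test
-- with a repeated entry.index scan. (On List Int the try/except never fires: int
-- comparisons cannot raise; the ports omit it.)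

-- ===== PORT A =====
-- the `for i in range(len(entry))` loop, from index i onwards
def inputChecking_aGo (entry : List Int) (i : Nat) : Bool :=
  if h : i < entry.length then
    let element := entry[i]
    if element > 49 || element < 0 || (PySem.List.index? entry element != some i) then
      false
    else
      inputChecking_aGo entry (i + 1)
  else
    true
termination_by entry.length - i

def inputChecking (entry : List Int) : Bool :=
  if entry.length < 6 then false
  else inputChecking_aGo entry 0

-- ===== PORT B =====
-- the `for k in range(len(s) - 1)` adjacent-duplicate scan, from index k onwards
def inputChecking_bAdj (s : List Int) (k : Nat) : Bool :=
  if h : k + 1 < s.length then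
    if s[k] == s[k + 1] then false
    else inputChecking_bAdj s (k + 1)
  else
    true
termination_by s.length - k

def inputChecking_alt (entry : List Int) : Bool :=
  if entry.length < 6 then false
  else
    let s := PySem.List.sorted entry (fun x => x) false
    match PySem.List.pyGet? s 0, PySem.List.pyGet? s (-1) with
    | some lo, some hi =>
      if lo < 0 || hi > 49 then false
      else inputChecking_bAdj s 0
    | _, _ => false   -- unreachable: len(entry) ≥ 6, so s is nonempty

-- ===== PRECONDITION & SPEC =====
def Spec_inputChecking (entry : List Int) (out : Bool) : Prop := out = inputChecking_alt entry
instance (entry : List Int) (out : Bool) : Decidable (Spec_inputChecking entry out) := by unfold Spec_inputChecking; infer_instance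

-- ===== CLAIM (what is proved, stated in full; the proofs are below) =====
def Claim_equal_inputChecking : Prop := ∀ (entry : List Int), Dom_inputChecking entry → Spec_inputChecking entry (inputChecking entry)

-- ===== LEMMAS AND PROOFS =====

-- A's loop succeeds iff every remaining index holds an in-range value whose first occurrence is itself
theorem inputChecking_aGo_iff (entry : List Int) (i : Nat) :
    inputChecking_aGo entry i = true ↔
      ∀ j (hj : j < entry.length), i ≤ j →
        entry[j] ≤ 49 ∧ 0 ≤ entry[j] ∧ PySem.List.index? entry entry[j] = some j := by
  fun_induction inputChecking_aGo entry i with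
  | case1 i h element hbad =>
    simp only [Bool.false_eq_true, false_iff]
    intro hall
    have := hall i h (le_refl i)
    rw [Bool.or_eq_true, Bool.or_eq_true] at hbad
    rcases hbad with (hb | hb) | hb
    · simp only [element, decide_eq_true_eq] at hb; omega
    · simp only [element, decide_eq_true_eq] at hb; omega
    · rw [bne_iff_ne] at hb; exact hb this.2.2
  | case2 i h element hbad ih =>
    simp only [element, Bool.or_eq_true, bne_iff_ne, decide_eq_true_eq, ne_eq, not_or,
      not_lt, Decidable.not_not] at hbad
    obtain ⟨⟨h1, h2⟩, h3⟩ := hbad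
    rw [ih]
    constructor
    · intro hall j hj hij
      rcases Nat.eq_or_lt_of_le hij with rfl | hlt
      · exact ⟨h1, by omega, h3⟩
      · exact hall j hj hlt
    · intro hall j hj hij
      exact hall j hj (by omega)
  | case3 i h =>
    simp only [true_iff]
    intro j hj hij
    omega

-- first-occurrence-at-every-index is exactly Nodup
theorem index?_all_iff_nodup (entry : List Int) :
    (∀ j (hj : j < entry.length), PySem.List.index? entry entry[j] = some j) ↔ entry.Nodup := by
  constructor
  · intro hall
    rw [List.nodup_iff_getElem?_ne_getElem?]
    intro a b hab hb hne
    obtain ⟨hk, _, hfirst⟩ := PySem.List.getElem_of_index?_eq_some (hall b hb)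
    apply hfirst a hab
    have ha : a < entry.length := by omega
    rw [List.getElem?_eq_getElem ha, List.getElem?_eq_getElem hb] at hne
    exact Option.some.inj hne
  · intro hnd j hj
    rw [PySem.List.index?_eq_some_iff]
    refine ⟨entry.take j, entry.drop (j + 1), ?_, ?_, ?_⟩
    · rw [← List.drop_eq_getElem_cons hj, List.take_append_drop]
    · simp [List.length_take]; omega
    · intro hmem
      obtain ⟨k, hk, hke⟩ := List.getElem_of_mem hmem
      have hk' : k < entry.length := by
        have := hk; simp [List.length_take] at this; omega
      rw [List.getElem_take] at hke
      have hkj : k = j := (hnd.getElem_inj_iff).mp hke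
      have : k < j := by have := hk; simp [List.length_take] at this; omega
      omega

-- B's adjacent scan succeeds iff no two consecutive elements from index k on are equal
theorem inputChecking_bAdj_iff (s : List Int) (k : Nat) :
    inputChecking_bAdj s k = true ↔
      ∀ j, k ≤ j → (hj : j + 1 < s.length) → s[j] ≠ s[j + 1] := by
  fun_induction inputChecking_bAdj s k with
  | case1 k h heq =>
    simp only [Bool.false_eq_true, false_iff]
    intro hall
    exact hall k (le_refl k) h (beq_iff_eq.mp heq)
  | case2 k h hne ih =>
    rw [ih]
    constructor
    · intro hall j hkj hj
      rcases Nat.eq_or_lt_of_le hkj with rfl | hlt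
      · exact fun he => (beq_iff_eq.mpr he ▸ hne) rfl
      · exact hall j hlt hj
    · intro hall j hkj hj
      exact hall j (by omega) hj
  | case3 k h =>
    simp only [true_iff]
    intro j hkj hj
    omega

-- on a (≤)-sorted list, adjacent-distinct is exactly Nodup
theorem sorted_adj_ne_iff_nodup (s : List Int) (hs : s.Pairwise (· ≤ ·)) :
    (∀ j, 0 ≤ j → (hj : j + 1 < s.length) → s[j] ≠ s[j + 1]) ↔ s.Nodup := by
  constructor
  · intro hadj
    have hchain : s.IsChain (· < ·) := by
      rw [List.isChain_iff_getElem]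
      intro j hj
      have hle : s[j] ≤ s[j + 1] :=
        List.pairwise_iff_getElem.mp hs j (j + 1) (by omega) (by omega) (by omega)
      exact lt_of_le_of_ne hle (hadj j (Nat.zero_le j) (by omega))
    exact ((List.isChain_iff_pairwise).mp hchain).nodup
  · intro hnd j _ hj heq
    have := (hnd.getElem_inj_iff).mp heq
    omega

-- ===== VERDICT (by name: the statement is the Claim_ definition above) =====
theorem inputChecking_spec : Claim_equal_inputChecking := by
  intro entry _
  unfold Spec_inputChecking inputChecking inputChecking_alt
  by_cases hlen : entry.length < 6
  · simp [hlen]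
  · simp only [hlen, if_false]
    set s := PySem.List.sorted entry (fun x => x) false with hsdef
    have hperm : s.Perm entry := PySem.List.sorted_perm entry (fun x => x) false
    have hpair : s.Pairwise (· ≤ ·) := PySem.List.sorted_pairwise entry (fun x => x)
    have hslen : s.length = entry.length := hperm.length_eq
    have hne0 : 0 < s.length := by omega
    have hget0 : PySem.List.pyGet? s 0 = some s[0] := by
      rw [PySem.List.pyGet?_zero, List.getElem?_eq_getElem hne0]
    have hgetl : PySem.List.pyGet? s (-1) = some s[s.length - 1] := by
      rw [PySem.List.pyGet?_neg_one, List.getLast?_eq_getElem?, List.getElem?_eq_getElem (by omega)]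
    rw [hget0, hgetl]
    -- s[0] is a lower bound and s[len-1] an upper bound of all elements
    have hlb : ∀ j (hj : j < s.length), s[0] ≤ s[j] := fun j hj =>
      PySem.List.sorted_id_getElem_mono entry (Nat.zero_le j) (hsdef ▸ hj)
    have hub : ∀ j (hj : j < s.length), s[j] ≤ s[s.length - 1] := fun j hj =>
      PySem.List.sorted_id_getElem_mono entry (by omega) (hsdef ▸ (by omega : s.length - 1 < s.length))
    by_cases hrange : ∀ x ∈ entry, 0 ≤ x ∧ x ≤ 49
    · have hlo : ¬ s[0] < 0 := by
        have : s[0] ∈ entry := hperm.mem_iff.mp (s.getElem_mem hne0)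
        have := hrange _ this; omega
      have hhi : ¬ s[s.length - 1] > 49 := by
        have : s[s.length - 1] ∈ entry := hperm.mem_iff.mp (s.getElem_mem (by omega))
        have := hrange _ this; omega
      simp only [hlo, hhi, decide_false, Bool.or_self, Bool.false_eq_true, if_false]
      -- both sides reduce to the nodup question
      by_cases hnd : entry.Nodup
      · have hA : inputChecking_aGo entry 0 = true := by
          rw [inputChecking_aGo_iff]
          intro j hj _
          have hmem := hrange _ (entry.getElem_mem hj)
          exact ⟨hmem.2, hmem.1, (index?_all_iff_nodup entry).mpr hnd j hj⟩
        have hB : inputChecking_bAdj s 0 = true := by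
          rw [inputChecking_bAdj_iff]
          intro j _ hj
          exact (sorted_adj_ne_iff_nodup s hpair).mpr (hperm.nodup_iff.mpr hnd) j (Nat.zero_le j) hj
        rw [hA, hB]
      · have hA : inputChecking_aGo entry 0 = false := by
          rw [Bool.eq_false_iff, ne_eq, inputChecking_aGo_iff]
          intro hall
          exact hnd ((index?_all_iff_nodup entry).mp (fun j hj => (hall j hj (Nat.zero_le j)).2.2))
        have hB : inputChecking_bAdj s 0 = false := by
          rw [Bool.eq_false_iff, ne_eq, inputChecking_bAdj_iff]
          intro hall
          exact hnd (hperm.nodup_iff.mp ((sorted_adj_ne_iff_nodup s hpair).mp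
            (fun j _ hj => hall j (Nat.zero_le j) hj)))
        rw [hA, hB]
    · -- some element out of range: both sides are false
      push Not at hrange
      obtain ⟨x, hxmem, hxbad⟩ := hrange
      obtain ⟨j, hj, hje⟩ := List.getElem_of_mem (hperm.mem_iff.mpr hxmem)
      have hbad : s[0] < 0 ∨ s[s.length - 1] > 49 := by
        by_cases hx0 : 0 ≤ x
        · right; have := hub j hj; omega
        · left; have := hlb j hj; omega
      have hA : inputChecking_aGo entry 0 = false := by
        rw [Bool.eq_false_iff, ne_eq, inputChecking_aGo_iff]
        intro hall
        obtain ⟨j', hj', hje'⟩ := List.getElem_of_mem hxmem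
        have := hall j' hj' (Nat.zero_le j')
        rw [hje'] at this
        exact absurd this.1 (not_le.mpr (hxbad this.2.1))
      rcases hbad with hb | hb
      · simp only [hb, decide_true, Bool.true_or, if_true, hA]
      · simp only [hb, decide_true, Bool.or_true, if_true, hA]
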